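-- pv_equiv track=rewrite | github.com/BeAllAround/FreeStyle | Codewars/Pair Zeros.py | pair_zeros
-- ===== SOURCE A (Python) =====
-- def search(arr, inx):
--     for x in range(inx+1, len(arr)):
--         if arr[x] == 0:
--             return x;
--     return -1;
--
-- def pair_zeros(arr):
--     arr_1 = list(arr);
--     inx = -1;
--     x = 0;
--     modify_size = len(arr_1);
--     while(x < modify_size):
--         if(arr_1[x] == 0):
--             inx = search(arr_1, x)
--             if(inx!=-1):
--                 del arr_1[inx];
--                 modify_size = len(arr_1); # keep the fixed size
--         x+=1;
--     return arr_1;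
-- ===== SOURCE B (Python) =====
-- def pair_zeros(arr):
--     out = []
--     drop = False
--     for v in arr:
--         if v == 0 and drop:
--             drop = False
--         else:
--             out.append(v)
--             if v == 0:
--                 drop = True
--     return out
-- ===== Notes on version B (the rewrite author's own statement) =====
-- stated objective: alternative
-- what changed: Replace the delete-in-place scan (for each zero, linearly search for the next zero and delete it from the list) by a single pass with a parity toggle that keeps odd-occurrence zeros of each consecutive pairing and drops even ones.
import Mathlib
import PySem

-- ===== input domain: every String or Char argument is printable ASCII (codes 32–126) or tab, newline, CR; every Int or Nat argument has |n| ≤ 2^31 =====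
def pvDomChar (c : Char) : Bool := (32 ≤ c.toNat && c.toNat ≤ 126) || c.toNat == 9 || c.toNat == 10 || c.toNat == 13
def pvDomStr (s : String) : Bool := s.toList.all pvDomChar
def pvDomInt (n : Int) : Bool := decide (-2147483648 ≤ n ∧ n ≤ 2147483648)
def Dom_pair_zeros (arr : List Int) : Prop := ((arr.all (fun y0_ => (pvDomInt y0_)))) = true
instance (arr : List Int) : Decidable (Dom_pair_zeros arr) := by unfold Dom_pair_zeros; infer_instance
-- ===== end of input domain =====

-- B: a single-pass parity toggle instead of A's search-and-delete scan (alternative algorithm); return value only (A copies its input, neither mutates the caller's list).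

-- ===== PORT A =====
-- for x in range(inx+1, len(arr)): if arr[x] == 0: return x / return -1
def searchAux (arr : List Int) (x : Nat) : Int :=
  if h : x < arr.length then
    if arr[x] = 0 then (x : Int) else searchAux arr (x + 1)
  else -1
termination_by arr.length - x

def search (arr : List Int) (inx : Nat) : Int := searchAux arr (inx + 1)

-- the while loop of pair_zeros (x counts up, arr1 shrinks on deletion)
def loopA (arr1 : List Int) (x : Nat) : List Int :=
  if h : x < arr1.length then
    if arr1[x] = 0 then
      let inx := search arr1 x
      if inx ≠ -1 then loopA (arr1.eraseIdx inx.toNat) (x + 1)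
      else loopA arr1 (x + 1)
    else loopA arr1 (x + 1)
  else arr1
termination_by arr1.length - x
decreasing_by
  · have _h1 := List.length_eraseIdx_le arr1 inx.toNat
    have h2 := List.length_eraseIdx_le arr1 (search arr1 x).toNat
    omega
  · omega
  · omega

def pair_zeros (arr : List Int) : List Int := loopA arr 0

-- ===== PORT B =====
-- one pass: out grows at the end; drop records that the previous zero awaits its pair
def altStep (st : List Int × Bool) (v : Int) : List Int × Bool :=
  if v = 0 ∧ st.2 then (st.1, false)
  else (st.1 ++ [v], if v = 0 then true else st.2)

def pair_zeros_alt (arr : List Int) : List Int := (arr.foldl altStep ([], false)).1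

-- ===== PRECONDITION & SPEC =====
def Spec_pair_zeros (arr : List Int) (out : List Int) : Prop := out = pair_zeros_alt arr
instance (arr : List Int) (out : List Int) : Decidable (Spec_pair_zeros arr out) := by unfold Spec_pair_zeros; infer_instance

-- ===== CLAIM (what is proved, stated in full; the proofs are below) =====
def Claim_equal_pair_zeros : Prop := ∀ (arr : List Int), Dom_pair_zeros arr → Spec_pair_zeros arr (pair_zeros arr)

-- ===== LEMMAS AND PROOFS =====

-- canonical "pair zeros" recursion: a zero takes out the first zero after it
def g : List Int → List Int
  | [] => []
  | v :: t => if v = 0 then 0 :: g (t.eraseP (· == 0)) else v :: g t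
termination_by s => s.length
decreasing_by
  · have : (t.eraseP (· == (0:Int))).length ≤ t.length := List.length_eraseP_le; simp; omega
  · simp

-- the toggle recursion underlying B
def altGo : List Int → Bool → List Int
  | [], _ => []
  | v :: t, d =>
    if v = 0 then (if d then altGo t false else 0 :: altGo t true)
    else v :: altGo t d

theorem foldl_altStep (l : List Int) (out : List Int) (d : Bool) :
    (l.foldl altStep (out, d)).1 = out ++ altGo l d := by
  induction l generalizing out d with
  | nil => simp [altGo]
  | cons v t ih =>
    by_cases hv : v = 0
    · cases d with
      | false => simp [altStep, altGo, hv, ih]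
      | true => simp [altStep, altGo, hv, ih]
    · simp [altStep, altGo, hv, ih]

theorem altGo_nz (t : List Int) (d : Bool) (h : ∀ v ∈ t, v ≠ 0) : altGo t d = t := by
  induction t generalizing d with
  | nil => rfl
  | cons v ts ih =>
    have hv : v ≠ 0 := h v (by simp)
    simp [altGo, hv]; exact ih d (fun w hw => h w (by simp [hw]))

theorem altGo_nz_append (a b : List Int) (d : Bool) (h : ∀ v ∈ a, v ≠ 0) :
    altGo (a ++ b) d = a ++ altGo b d := by
  induction a with
  | nil => rfl
  | cons v ts ih =>
    have hv : v ≠ 0 := h v (by simp)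
    simp [altGo, hv]; exact ih (fun w hw => h w (by simp [hw]))

theorem g_nz (t : List Int) (h : ∀ v ∈ t, v ≠ 0) : g t = t := by
  induction t with
  | nil => rw [g]
  | cons v ts ih =>
    have hv : v ≠ 0 := h v (by simp)
    rw [g]; simp [hv]; exact ih (fun w hw => h w (by simp [hw]))

theorem g_nz_append (a b : List Int) (h : ∀ v ∈ a, v ≠ 0) : g (a ++ b) = a ++ g b := by
  induction a with
  | nil => simp
  | cons v ts ih =>
    have hv : v ≠ 0 := h v (by simp)
    rw [List.cons_append, g]; simp [hv]
    exact ih (fun w hw => h w (by simp [hw]))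

theorem eraseP_split (a b : List Int) (h : ∀ v ∈ a, v ≠ 0) :
    (a ++ 0 :: b).eraseP (· == 0) = a ++ b := by
  induction a with
  | nil => simp
  | cons v ts ih =>
    have hv : v ≠ 0 := h v (by simp)
    simp [hv]
    exact ih (fun w hw => h w (by simp [hw]))

theorem split_first_zero (t : List Int) (h : (0 : Int) ∈ t) :
    ∃ a b, t = a ++ 0 :: b ∧ ∀ v ∈ a, v ≠ 0 := by
  induction t with
  | nil => simp at h
  | cons v ts ih =>
    by_cases hv : v = 0
    · exact ⟨[], ts, by simp [hv], by simp⟩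
    · have : (0 : Int) ∈ ts := by
        rcases List.mem_cons.mp h with h1 | h1
        · exact absurd h1.symm hv
        · exact h1
      obtain ⟨a, b, ht, ha⟩ := ih this
      exact ⟨v :: a, b, by simp [ht], by
        intro w hw
        rcases List.mem_cons.mp hw with rfl | hw
        · exact hv
        · exact ha w hw⟩

-- g equals B's toggle recursion
theorem g_eq_altGo (n : Nat) : ∀ s : List Int, s.length ≤ n → g s = altGo s false := by
  induction n with
  | zero => intro s hs; have : s = [] := List.eq_nil_of_length_eq_zero (by omega); subst this; rw [g]; rfl
  | succ m ih =>
    intro s hs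
    match s with
    | [] => rw [g]; rfl
    | v :: t =>
      by_cases hv : v = 0
      · subst hv
        rw [g, altGo]; simp
        by_cases hz : (0 : Int) ∈ t
        · obtain ⟨a, b, rfl, ha⟩ := split_first_zero t hz
          rw [eraseP_split a b ha, g_nz_append a b ha, altGo_nz_append a (0 :: b) true ha]
          rw [altGo]; simp
          exact ih b (by simp at hs; omega)
        · have hnz : ∀ w ∈ t, w ≠ 0 := fun w hw hww => hz (hww ▸ hw)
          have he3 : List.eraseP (fun x => x == 0) t = t :=
            List.eraseP_of_forall_not (fun w hw => by simp [hnz w hw])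
          rw [show (t.eraseP (· == (0:Int))) = t from he3, g_nz t hnz, altGo_nz t true hnz]
      · rw [g, altGo]; simp [hv]
        exact ih t (by simp at hs; omega)

-- searchAux characterizations
theorem searchAux_none (t : List Int) : ∀ p : List Int, (∀ v ∈ t, v ≠ 0) →
    searchAux (p ++ t) p.length = -1 := by
  induction t with
  | nil => intro p _; rw [searchAux]; simp
  | cons v ts ih =>
    intro p h
    have hv : v ≠ 0 := h v (by simp)
    rw [searchAux]
    have hlen : p.length < (p ++ v :: ts).length := by simp
    have hget : (p ++ v :: ts)[p.length]'hlen = v := by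
      rw [List.getElem_append_right (Nat.le_refl _)]; simp
    simp only [hlen, dif_pos, hget, hv, if_neg, not_false_iff]
    have := ih (p ++ [v]) (fun w hw => h w (by simp [hw]))
    simpa using this

theorem searchAux_some (a : List Int) : ∀ (p b : List Int), (∀ v ∈ a, v ≠ 0) →
    searchAux (p ++ (a ++ 0 :: b)) p.length = (p.length : Int) + a.length := by
  induction a with
  | nil =>
    intro p b _
    simp only [List.nil_append]
    rw [searchAux]
    have hlen : p.length < (p ++ 0 :: b).length := by simp
    rw [dif_pos hlen]
    have hget : (p ++ 0 :: b)[p.length]'hlen = 0 := by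
      rw [List.getElem_append_right (Nat.le_refl _)]; simp
    rw [hget]; simp
  | cons v ts ih =>
    intro p b h
    have hv : v ≠ 0 := h v (by simp)
    simp only [List.cons_append]
    rw [searchAux]
    have hlen : p.length < (p ++ v :: (ts ++ 0 :: b)).length := by simp
    rw [dif_pos hlen]
    have hget : (p ++ v :: (ts ++ 0 :: b))[p.length]'hlen = v := by
      rw [List.getElem_append_right (Nat.le_refl _)]; simp
    rw [hget, if_neg hv]
    have hih := ih (p ++ [v]) b (fun w hw => h w (by simp [hw]))
    simp only [List.append_assoc, List.cons_append, List.nil_append, List.length_append,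
      List.length_cons, List.length_nil] at hih ⊢
    rw [hih]; push_cast; omega

theorem eraseIdx_append_mid (q : List Int) (z : Int) (b : List Int) :
    (q ++ z :: b).eraseIdx q.length = q ++ b := by
  induction q with
  | nil => simp
  | cons v ts ih => simpa [List.eraseIdx] using ih

-- the main loop invariant: positions < p.length are settled, and g describes the rest
theorem loopA_eq (n : Nat) : ∀ (s p : List Int), s.length ≤ n →
    loopA (p ++ s) p.length = p ++ g s := by
  induction n with
  | zero =>
    intro s p hs
    have : s = [] := List.eq_nil_of_length_eq_zero (by omega)
    subst this; rw [loopA]; simp [g]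
  | succ m ih =>
    intro s p hs
    match s with
    | [] => rw [loopA]; simp [g]
    | v :: t =>
      have hlen : p.length < (p ++ v :: t).length := by simp
      have hget : (p ++ v :: t)[p.length]'hlen = v := by
        rw [List.getElem_append_right (Nat.le_refl _)]; simp
      by_cases hv : v = 0
      · subst hv
        rw [loopA]
        simp only [hlen, dif_pos, hget]
        by_cases hz : (0 : Int) ∈ t
        · obtain ⟨a, b, rfl, ha⟩ := split_first_zero t hz
          have hsearch : search (p ++ 0 :: (a ++ 0 :: b)) p.length
              = (p.length : Int) + 1 + a.length := by
            unfold search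
            have hsa := searchAux_some a (p ++ [0]) b ha
            simp only [List.append_assoc, List.cons_append, List.nil_append, List.length_append,
              List.length_cons, List.length_nil] at hsa ⊢
            rw [hsa]; push_cast; ring
          rw [hsearch]
          have hne : ((p.length : Int) + 1 + a.length) ≠ -1 := by omega
          simp only [ne_eq, hne, not_false_iff, if_pos]
          have htoNat : ((p.length : Int) + 1 + a.length).toNat = p.length + 1 + a.length := by
            omega
          rw [htoNat]
          have herase : (p ++ 0 :: (a ++ 0 :: b)).eraseIdx (p.length + 1 + a.length)
              = p ++ 0 :: (a ++ b) := by
            have he : p ++ 0 :: (a ++ 0 :: b) = (p ++ 0 :: a) ++ 0 :: b := by simp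
            have hl : p.length + 1 + a.length = (p ++ 0 :: a).length := by simp; omega
            rw [he, hl, eraseIdx_append_mid]
            simp
          rw [herase]
          have he2 : p ++ 0 :: (a ++ b) = (p ++ [0]) ++ (a ++ b) := by simp
          rw [he2, show p.length + 1 = (p ++ [0]).length from by simp]
          rw [ih (a ++ b) (p ++ [0]) (by simp at hs ⊢; omega)]
          rw [g]; simp [eraseP_split a b ha]
        · have hnz : ∀ w ∈ t, w ≠ 0 := fun w hw hww => hz (hww ▸ hw)
          have hsearch : search (p ++ 0 :: t) p.length = -1 := by
            unfold search
            have hsn := searchAux_none t (p ++ [0]) hnz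
            simp only [List.append_assoc, List.cons_append, List.nil_append, List.length_append,
              List.length_cons, List.length_nil] at hsn ⊢
            exact hsn
          rw [hsearch]
          have hc : ¬((-1 : Int) ≠ -1) := by simp
          rw [if_neg hc]
          have he2 : p ++ 0 :: t = (p ++ [0]) ++ t := by simp
          rw [he2, show p.length + 1 = (p ++ [0]).length from by simp]
          rw [ih t (p ++ [0]) (by simp at hs ⊢; omega)]
          rw [g]
          have he3 : List.eraseP (fun x => x == 0) t = t :=
            List.eraseP_of_forall_not (fun w hw => by simp [hnz w hw])
          simp [he3, g_nz t hnz]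
      · rw [loopA]
        simp only [hlen, dif_pos, hget, hv]
        have he2 : p ++ v :: t = (p ++ [v]) ++ t := by simp
        rw [he2, show p.length + 1 = (p ++ [v]).length from by simp]
        rw [ih t (p ++ [v]) (by simp at hs ⊢; omega)]
        rw [g]; simp [hv]

-- ===== VERDICT (by name: the statement is the Claim_ definition above) =====
theorem pair_zeros_spec : Claim_equal_pair_zeros := by
  intro arr _
  unfold Spec_pair_zeros pair_zeros pair_zeros_alt
  have h1 : loopA arr 0 = g arr := by
    have := loopA_eq arr.length arr [] (Nat.le_refl _)
    simpa using this
  rw [h1, foldl_altStep, g_eq_altGo arr.length arr (Nat.le_refl _)]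
  simp
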